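-- pv_equiv track=rewrite | github.com/chris-leonard/censor_dispenser | censor_dispenser_alt.py | text_to_words
-- ===== SOURCE A (Python) =====
-- import string
--
-- def strip_end_punctuation(str):
--     'Returns slice of string up to last (alphabetical) letter'
--     last_letter_index = len(str)-1
--     while last_letter_index >= 0:
--         if str[last_letter_index] not in string.ascii_letters:
--             last_letter_index -= 1
--         else:
--             break
--
--     return str[:last_letter_index+1]
--
-- def text_to_words(text):
--     '''
--     Splits text string into individual words and returns list of pairs (word, index), where index is index in text where word appears
--     '''
--     word_list = []
--     word = ''
--     word_index = 0
--
--     for i, char in enumerate(text):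
--         # Start of new word
--         if word == '':
--             if char in string.ascii_letters:
--                 word_index = i
--                 word = char
--
--         # In mid-word, either add letter or reset
--         else:
--             if char == ' ':
--                 word_list.append((strip_end_punctuation(word), word_index))
--                 word = ''
--             else:
--                 word += char
--
--     # Add final word to list
--     if word != '': word_list.append((strip_end_punctuation(word), word_index))
--
--     return word_list
-- ===== SOURCE B (Python) =====
-- def _is_letter(ch):
--     return ('a' <= ch <= 'z') or ('A' <= ch <= 'Z')
--
-- def _first_letter_index(token):
--     for k in range(len(token)):
--         if _is_letter(token[k]):
--             return k
--     return None
--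
-- def _last_letter_index(token):
--     for k in range(len(token) - 1, -1, -1):
--         if _is_letter(token[k]):
--             return k
--     return None
--
-- def text_to_words(text):
--     '''
--     Splits text string into individual words and returns list of pairs (word, index), where index is index in text where word appears
--     '''
--     result = []
--     start = 0
--     for token in text.split(' '):
--         first = _first_letter_index(token)
--         if first is not None:
--             last = _last_letter_index(token)
--             result.append((token[first:last + 1], start + first))
--         start += len(token) + 1
--     return result
-- ===== Notes on version B (the rewrite author's own statement) =====
-- stated objective: faster
-- what changed: Replaced A's character-by-character accumulator state machine with a token-level pass: split the text on single spaces and, per token, slice between the first and last ASCII letter while tracking a running offset.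
import Mathlib
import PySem

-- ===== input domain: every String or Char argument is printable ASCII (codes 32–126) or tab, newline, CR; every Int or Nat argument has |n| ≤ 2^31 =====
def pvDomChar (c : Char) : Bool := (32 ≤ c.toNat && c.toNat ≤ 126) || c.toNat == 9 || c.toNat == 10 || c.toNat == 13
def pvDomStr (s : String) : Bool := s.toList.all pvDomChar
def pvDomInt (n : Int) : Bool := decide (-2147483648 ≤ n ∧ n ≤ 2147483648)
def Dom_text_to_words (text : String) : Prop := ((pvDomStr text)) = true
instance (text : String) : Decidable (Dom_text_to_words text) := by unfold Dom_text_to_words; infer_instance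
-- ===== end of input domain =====

-- B replaces A's character-by-character state machine with a token-level pass over text.split(' ')
-- (objective: faster by a constant factor — no per-character word accumulation; measured).

-- ===== PORT A =====

-- char in string.ascii_letters
def isLetter (c : Char) : Bool := ('a' ≤ c && c ≤ 'z') || ('A' ≤ c && c ≤ 'Z')

-- strip_end_punctuation's while loop: argument n = last_letter_index + 1; returns the
-- take-length last_letter_index + 1 (0 when the loop runs off the left end).
def stripLen (w : List Char) : Nat → Nat
  | 0 => 0
  | n + 1 => if isLetter (w.getD n ' ') then n + 1 else stripLen w n

-- strip_end_punctuation: str[:last_letter_index+1]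
def stripEnd (w : List Char) : List Char := w.take (stripLen w w.length)

-- the for-loop of A: state (accumulated word_list, word, word_index); i is enumerate's index
def loopA : List Char → Int → List (List Char × Int) → List Char → Int → List (List Char × Int)
  | [], _, acc, word, wi =>
      -- after the loop: if word != '': append final word
      if word = [] then acc else acc ++ [(stripEnd word, wi)]
  | c :: cs, i, acc, word, wi =>
      if word = [] then
        if isLetter c then loopA cs (i + 1) acc [c] i
        else loopA cs (i + 1) acc [] wi
      else
        if c = ' ' then loopA cs (i + 1) (acc ++ [(stripEnd word, wi)]) [] wi
        else loopA cs (i + 1) acc (word ++ [c]) wi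

def text_to_words (text : String) : List (String × Int) :=
  (loopA text.toList 0 [] [] 0).map (fun p => (String.mk p.1, p.2))

-- ===== PORT B =====

-- text.split(' '): split on every single space, keeping empty tokens
def splitSpace : List Char → List (List Char)
  | [] => [[]]
  | c :: cs =>
      if c = ' ' then [] :: splitSpace cs
      else
        match splitSpace cs with
        | [] => [[c]]   -- unreachable: splitSpace is never empty
        | t :: ts => (c :: t) :: ts

-- _first_letter_index: forward scan for the first ASCII letter
def firstLet : List Char → Option Nat
  | [] => none
  | c :: cs => if isLetter c then some 0 else (firstLet cs).map (· + 1)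

-- _last_letter_index: backward scan (fuel n = index + 1, starting at len(token))
def lastLetAux (t : List Char) : Nat → Option Nat
  | 0 => none
  | n + 1 => if isLetter (t.getD n ' ') then some n else lastLetAux t n

def lastLet (t : List Char) : Option Nat := lastLetAux t t.length

-- B's for-loop over the tokens, carrying the running global offset and the result accumulator;
-- token[first:last+1] is (t.drop f).take (l+1-f), exact here since 0 ≤ f ≤ l < len t.
def loopB : List (List Char) → Int → List (List Char × Int) → List (List Char × Int)
  | [], _, acc => acc
  | t :: ts, start, acc =>
      let acc' :=
        match firstLet t with
        | none => acc
        | some f =>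
            let l := (lastLet t).getD 0
            acc ++ [((t.drop f).take (l + 1 - f), start + (f : Int))]
      loopB ts (start + (t.length : Int) + 1) acc'

def text_to_words_alt (text : String) : List (String × Int) :=
  (loopB (splitSpace text.toList) 0 []).map (fun p => (String.mk p.1, p.2))

-- ===== PRECONDITION & SPEC =====
def Spec_text_to_words (text : String) (out : List (String × Int)) : Prop := out = text_to_words_alt text
instance (text : String) (out : List (String × Int)) : Decidable (Spec_text_to_words text out) := by unfold Spec_text_to_words; infer_instance

-- ===== CLAIM (what is proved, stated in full; the proofs are below) =====
def Claim_equal_text_to_words : Prop := ∀ (text : String), Dom_text_to_words text → Spec_text_to_words text (text_to_words text)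

-- ===== LEMMAS AND PROOFS =====

theorem splitSpace_ne_nil (cs : List Char) : splitSpace cs ≠ [] := by
  cases cs with
  | nil => simp [splitSpace]
  | cons c cs =>
      simp only [splitSpace]
      split
      · simp
      · cases h : splitSpace cs <;> simp

theorem loopB_acc (ts : List (List Char)) : ∀ (s : Int) (acc : List (List Char × Int)),
    loopB ts s acc = acc ++ loopB ts s [] := by
  induction ts with
  | nil => intro s acc; simp [loopB]
  | cons t ts ih =>
      intro s acc
      cases h : firstLet t with
      | none => simp only [loopB, h]; exact ih _ _
      | some f =>
          simp only [loopB, h]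
          rw [ih (s + (t.length : Int) + 1)
                (acc ++ [((t.drop f).take ((lastLet t).getD 0 + 1 - f), s + (f : Int))]),
              ih (s + (t.length : Int) + 1)
                ([] ++ [((t.drop f).take ((lastLet t).getD 0 + 1 - f), s + (f : Int))])]
          simp

theorem lastLetAux_cons (t : List Char) (c : Char) : ∀ n : Nat,
    lastLetAux (c :: t) (n + 1) =
      match lastLetAux t n with
      | some l => some (l + 1)
      | none => if isLetter c then some 0 else none := by
  intro n
  induction n with
  | zero => simp [lastLetAux]
  | succ n ih =>
      simp only [lastLetAux, List.getD_cons_succ] at *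
      split <;> simp_all

theorem stripLen_eq_lastLetAux (w : List Char) : ∀ n : Nat,
    stripLen w n = match lastLetAux w n with | some l => l + 1 | none => 0 := by
  intro n
  induction n with
  | zero => simp [stripLen, lastLetAux]
  | succ n ih =>
      simp only [stripLen, lastLetAux]
      split <;> simp [ih]

-- A's strip_end_punctuation in terms of B's last-letter scan
theorem stripEnd_eq (w : List Char) :
    stripEnd w = w.take (match lastLet w with | some l => l + 1 | none => 0) := by
  simp [stripEnd, lastLet, stripLen_eq_lastLetAux]

theorem lastLet_cons (c : Char) (t : List Char) :
    lastLet (c :: t) =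
      match lastLet t with
      | some l => some (l + 1)
      | none => if isLetter c then some 0 else none := by
  simp [lastLet, List.length_cons, lastLetAux_cons]

-- a token containing a letter has a last letter
theorem lastLet_isSome_of_firstLet (t : List Char) :
    ∀ f : Nat, firstLet t = some f → ∃ l, lastLet t = some l := by
  induction t with
  | nil => intro f h; simp [firstLet] at h
  | cons d t ih =>
      intro f h
      rw [lastLet_cons]
      simp only [firstLet] at h
      split at h
      · rename_i hd
        cases hlt : lastLet t with
        | some l => exact ⟨l + 1, rfl⟩
        | none => exact ⟨0, by simp [hd]⟩
      · obtain ⟨f', hf', rfl⟩ := Option.map_eq_some_iff.mp h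
        obtain ⟨l, hl⟩ := ih f' hf'
        exact ⟨l + 1, by simp [hl]⟩

-- a token starting with a non-letter contributes the same pairs, shifted by one
theorem loopB_head_nonletter (c : Char) (t : List Char) (ts : List (List Char))
    (s : Int) (hc : isLetter c = false) :
    loopB ((c :: t) :: ts) s [] = loopB (t :: ts) (s + 1) [] := by
  have hf : firstLet (c :: t) = (firstLet t).map (· + 1) := by simp [firstLet, hc]
  cases h : firstLet t with
  | none =>
      simp only [loopB, hf, h, Option.map_none, List.length_cons]
      have : s + ((t.length : Int) + 1) + 1 = s + 1 + (t.length : Int) + 1 := by ring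
      rw [Nat.cast_add, Nat.cast_one, this]
  | some f =>
      obtain ⟨l, hl⟩ := lastLet_isSome_of_firstLet t f h
      have hlc : lastLet (c :: t) = some (l + 1) := by rw [lastLet_cons, hl]
      simp only [loopB, hf, h, Option.map_some, hlc, hl, Option.getD_some,
        List.drop_succ_cons, List.length_cons]
      have h1 : l + 1 + 1 - (f + 1) = l + 1 - f := by omega
      have h2 : s + ((f : Nat) + 1 : Nat) = s + 1 + (f : Int) := by push_cast; ring
      have h3 : s + ((t.length : Int) + 1) + 1 = s + 1 + (t.length : Int) + 1 := by ring
      rw [h1, h2, Nat.cast_add, Nat.cast_one, h3]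

-- the two mutually-needed loop invariants, proved together by induction on the character list:
-- (1) from the empty-word state A's loop equals B's loop over the remaining tokens;
-- (2) mid-word, A finishes the current token t, emits (stripEnd (w ++ t), wi), and continues empty.
theorem loop_main (cs : List Char) :
    (∀ (i : Int) (acc : List (List Char × Int)) (wi : Int),
        loopA cs i acc [] wi = acc ++ loopB (splitSpace cs) i []) ∧
    (∀ (i : Int) (acc : List (List Char × Int)) (w : List Char) (wi : Int)
        (t : List Char) (ts : List (List Char)), w ≠ [] → splitSpace cs = t :: ts →
        loopA cs i acc w wi =
          (acc ++ [(stripEnd (w ++ t), wi)]) ++ loopB ts (i + (t.length : Int) + 1) []) := by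
  induction cs with
  | nil =>
      constructor
      · intro i acc wi; simp [loopA, splitSpace, loopB, firstLet]
      · intro i acc w wi t ts hw hsp
        simp only [splitSpace] at hsp
        cases hsp
        simp [loopA, hw, loopB]
  | cons c cs ih =>
      obtain ⟨ih1, ih2⟩ := ih
      obtain ⟨t, ts, hst⟩ : ∃ t ts, splitSpace cs = t :: ts := by
        cases h : splitSpace cs with
        | nil => exact absurd h (splitSpace_ne_nil cs)
        | cons a b => exact ⟨a, b, rfl⟩
      constructor
      · -- empty-word state
        intro i acc wi
        by_cases hsp : c = ' '
        · subst hsp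
          have hA : loopA (' ' :: cs) i acc [] wi = loopA cs (i + 1) acc [] wi := rfl
          have hB : loopB ([] :: splitSpace cs) i [] = loopB (splitSpace cs) (i + 1) [] := by
            simp [loopB, firstLet]
          rw [hA, ih1, show splitSpace (' ' :: cs) = [] :: splitSpace cs from by
            simp [splitSpace], hB]
        · have hsp' : splitSpace (c :: cs) = (c :: t) :: ts := by
            simp [splitSpace, hsp, hst]
          by_cases hc : isLetter c
          · -- start of a word at index i
            have hA : loopA (c :: cs) i acc [] wi = loopA cs (i + 1) acc [c] i := by
              simp [loopA, hc]
            have hf : firstLet (c :: t) = some 0 := by simp [firstLet, hc]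
            obtain ⟨l, hl⟩ := lastLet_isSome_of_firstLet (c :: t) 0 hf
            have hB : loopB ((c :: t) :: ts) i [] =
                [((c :: t).take (l + 1), i)] ++ loopB ts (i + 1 + (t.length : Int) + 1) [] := by
              simp only [loopB, hf, hl, Option.getD_some, List.drop_zero, Nat.sub_zero,
                Nat.cast_zero, add_zero, List.length_cons, List.nil_append]
              rw [loopB_acc, Nat.cast_add, Nat.cast_one,
                show i + ((t.length : Int) + 1) + 1 = i + 1 + (t.length : Int) + 1 from by ring]
            rw [hA, ih2 (i + 1) acc [c] i t ts (by simp) hst, hsp', hB]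
            rw [List.singleton_append, stripEnd_eq, hl]
            simp
          · -- non-letter, non-space: skipped by A, prepended to the head token for B
            have hA : loopA (c :: cs) i acc [] wi = loopA cs (i + 1) acc [] wi := by
              simp [loopA, hc]
            rw [hA, ih1, hsp', hst,
              loopB_head_nonletter c t ts i (by simpa using hc)]
      · -- mid-word state
        intro i acc w wi t' ts' hw hsp
        by_cases hc : c = ' '
        · subst hc
          simp only [splitSpace] at hsp
          cases hsp
          have hA : loopA (' ' :: cs) i acc w wi =
              loopA cs (i + 1) (acc ++ [(stripEnd w, wi)]) [] wi := by
            simp [loopA, hw]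
          rw [hA, ih1]
          simp
        · simp only [splitSpace, if_neg hc, hst] at hsp
          cases hsp
          have hA : loopA (c :: cs) i acc w wi = loopA cs (i + 1) acc (w ++ [c]) wi := by
            simp [loopA, hw, hc]
          rw [hA, ih2 (i + 1) acc (w ++ [c]) wi t ts (by simp) hst]
          rw [List.length_cons, Nat.cast_add, Nat.cast_one,
            show i + ((t.length : Int) + 1) + 1 = i + 1 + (t.length : Int) + 1 from by ring]
          simp

-- ===== VERDICT (by name: the statement is the Claim_ definition above) =====
theorem text_to_words_spec : Claim_equal_text_to_words := by
  intro text _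
  unfold Spec_text_to_words text_to_words text_to_words_alt
  rw [(loop_main text.toList).1 0 [] 0]
  simp
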